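-- pv_equiv track=rewrite | github.com/conorpbrady/advent_of_code | 2019/day_15.py | count_known_spaces
-- ===== SOURCE A (Python) =====
-- def count_known_spaces(map):
--     sum = 0
--     for line in map:
--         sum += line.count('.')
--         sum += line.count('#')
--         sum += line.count('D')
--         sum += line.count('D')
--     return sum
-- ===== SOURCE B (Python) =====
-- def count_known_spaces(map):
--     total = 0
--     for line in map:
--         for ch in line:
--             if ch == '.' or ch == '#':
--                 total += 1
--             elif ch == 'D':
--                 total += 2
--     return total
-- ===== Notes on version B (the rewrite author's own statement) =====
-- stated objective: faster
-- what changed: Replaces the four separate str.count scans per line with a single pass over each line's characters, adding weight 1 for '.' or '#' and 2 for 'D'.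
import Mathlib
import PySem

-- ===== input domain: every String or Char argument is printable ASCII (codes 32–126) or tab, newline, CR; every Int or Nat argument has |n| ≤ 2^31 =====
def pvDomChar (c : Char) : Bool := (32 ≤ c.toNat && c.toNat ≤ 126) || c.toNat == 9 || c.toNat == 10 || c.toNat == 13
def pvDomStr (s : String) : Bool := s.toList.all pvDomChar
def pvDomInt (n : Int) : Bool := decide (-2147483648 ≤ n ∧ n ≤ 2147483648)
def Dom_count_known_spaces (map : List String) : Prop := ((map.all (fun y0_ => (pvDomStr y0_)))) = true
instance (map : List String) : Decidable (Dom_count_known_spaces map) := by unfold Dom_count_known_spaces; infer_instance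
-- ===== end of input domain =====

-- B: one pass over each line's characters (weights 1 for '.'/'#', 2 for 'D') instead of A's four str.count scans per line.

-- ===== PORT A =====
def count_known_spaces (map : List String) : Int :=
  map.foldl (fun sum line =>
    sum + (PySem.Str.count line "." : Int)
        + (PySem.Str.count line "#" : Int)
        + (PySem.Str.count line "D" : Int)
        + (PySem.Str.count line "D" : Int)) 0

-- ===== PORT B =====
def count_known_spaces_alt (map : List String) : Int :=
  map.foldl (fun total line =>
    line.toList.foldl (fun total ch =>
      if ch = '.' ∨ ch = '#' then total + 1
      else if ch = 'D' then total + 2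
      else total) total) 0

-- ===== PRECONDITION & SPEC =====
def Spec_count_known_spaces (map : List String) (out : Int) : Prop := out = count_known_spaces_alt map
instance (map : List String) (out : Int) : Decidable (Spec_count_known_spaces map out) := by unfold Spec_count_known_spaces; infer_instance

-- ===== CLAIM (what is proved, stated in full; the proofs are below) =====
def Claim_equal_count_known_spaces : Prop := ∀ (map : List String), Dom_count_known_spaces map → Spec_count_known_spaces map (count_known_spaces map)

-- ===== LEMMAS AND PROOFS =====

-- single-character substring count is plain character count
theorem chars_count_go_singleton (c : Char) (l : List Char) (fuel acc : Nat)
    (h : l.length ≤ fuel) :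
    PySem.Chars.count.go [c] fuel l acc = acc + l.count c := by
  induction l generalizing fuel acc with
  | nil => cases fuel <;> simp [PySem.Chars.count.go]
  | cons x t ih =>
    cases fuel with
    | zero => simp at h
    | succ n =>
      have ht : t.length ≤ n := by simpa using h
      rw [PySem.Chars.count.go]
      by_cases hx : c = x
      · subst hx
        simp [List.isPrefixOf, ih n (acc + 1) ht]
        omega
      · simp [List.isPrefixOf, ih n acc ht, List.count_cons, hx, Ne.symm hx]

theorem chars_count_singleton (l : List Char) (c : Char) :
    PySem.Chars.count l [c] = l.count c := by
  rw [PySem.Chars.count]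
  simp [chars_count_go_singleton c l l.length 0 le_rfl]

-- B's inner character fold computes the weighted counts
theorem char_fold_eq (l : List Char) (acc : Int) :
    l.foldl (fun total ch =>
      if ch = '.' ∨ ch = '#' then total + 1
      else if ch = 'D' then total + 2
      else total) acc
    = acc + (l.count '.' : Int) + (l.count '#' : Int)
        + (l.count 'D' : Int) + (l.count 'D' : Int) := by
  induction l generalizing acc with
  | nil => simp
  | cons x t ih =>
    simp only [List.foldl_cons, List.count_cons, ih]
    by_cases h1 : x = '.' <;> by_cases h2 : x = '#' <;> by_cases h3 : x = 'D' <;>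
      simp [h1, h2, h3] <;> push_cast <;> ring

-- the two line-folds agree from any accumulator
theorem fold_lines_eq (t : List String) (a : Int) :
    t.foldl (fun sum line =>
      sum + (PySem.Str.count line "." : Int)
          + (PySem.Str.count line "#" : Int)
          + (PySem.Str.count line "D" : Int)
          + (PySem.Str.count line "D" : Int)) a
    = t.foldl (fun total line =>
        line.toList.foldl (fun total ch =>
          if ch = '.' ∨ ch = '#' then total + 1
          else if ch = 'D' then total + 2
          else total) total) a := by
  induction t generalizing a with
  | nil => rfl
  | cons s t ih =>
    simp only [List.foldl_cons]
    rw [ih, char_fold_eq]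
    simp [chars_count_singleton]

-- ===== VERDICT (by name: the statement is the Claim_ definition above) =====
theorem count_known_spaces_spec : Claim_equal_count_known_spaces := by
  intro map _
  unfold Spec_count_known_spaces count_known_spaces count_known_spaces_alt
  exact fold_lines_eq map 0
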